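-- pv_equiv track=rewrite | github.com/Pandaemonium/CausalOctonionGraph | world_code/Python_code/lightcone_state_visualizer.py | _build_children
-- ===== SOURCE A (Python) =====
-- from typing import Dict, List, Set, Tuple
--
-- def _build_children(node_ids: List[str], parents: Dict[str, List[str]]) -> Dict[str, List[str]]:
--     children: Dict[str, List[str]] = {nid: [] for nid in node_ids}
--     for nid in node_ids:
--         for p in parents.get(nid, []):
--             if p in children:
--                 children[p].append(nid)
--     for nid in children:
--         children[nid] = sorted(children[nid])
--     return children
-- ===== SOURCE B (Python) =====
-- def _build_children(node_ids, parents):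
--     keys = dict.fromkeys(node_ids)
--     return {k: sorted(nid for nid in node_ids
--                       for q in parents.get(nid, []) if q == k)
--             for k in keys}
-- ===== Notes on version B (the rewrite author's own statement) =====
-- stated objective: alternative
-- what changed: B replaces A's push-style mutation pass (append nid into children[p], then sort every bucket) by a pull-style dict comprehension that, for each distinct key, gathers and sorts its children directly from node_ids/parents; no mutable dict of lists and no membership guard are needed.
import Mathlib
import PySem

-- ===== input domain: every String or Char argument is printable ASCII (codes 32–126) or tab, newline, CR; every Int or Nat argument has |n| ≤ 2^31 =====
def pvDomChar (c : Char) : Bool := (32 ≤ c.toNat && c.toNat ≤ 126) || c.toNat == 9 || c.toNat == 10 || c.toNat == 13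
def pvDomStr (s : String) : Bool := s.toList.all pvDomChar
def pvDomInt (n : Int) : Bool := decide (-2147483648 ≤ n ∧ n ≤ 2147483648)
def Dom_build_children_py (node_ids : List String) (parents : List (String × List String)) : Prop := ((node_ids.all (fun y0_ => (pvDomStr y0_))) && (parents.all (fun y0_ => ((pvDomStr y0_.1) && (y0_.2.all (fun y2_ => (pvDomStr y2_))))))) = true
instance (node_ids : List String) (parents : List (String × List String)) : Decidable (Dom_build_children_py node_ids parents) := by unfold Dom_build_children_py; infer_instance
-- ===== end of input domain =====

-- B gathers each key's sorted children directly by a per-key comprehension (pull) instead of A's append-into-buckets pass plus per-bucket sort (push); proved equal to A on all inputs.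


-- ===== PORT A =====
-- children = {nid: [] for nid in node_ids}; populate by scanning node_ids; then sort each bucket.
def build_children_py (node_ids : List String) (parents : List (String × List String)) : List (String × List String) :=
  let children0 : PySem.Dict String (List String) :=
    node_ids.foldl (fun d nid => d.insert nid []) PySem.Dict.empty
  let children1 :=
    node_ids.foldl (fun d nid =>
      ((List.lookup nid parents).getD []).foldl
        (fun d p => if d.contains p then d.modify p [] (fun v => v ++ [nid]) else d) d) children0
  let children2 :=
    (children1.keys).foldl
      (fun d nid => d.insert nid (PySem.List.sorted (d.getD nid []) (fun x => x) false)) children1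
  children2.items

-- ===== PORT B =====
-- keys = dict.fromkeys(node_ids); {k: sorted(nid for nid in node_ids for q in parents.get(nid, []) if q == k) for k in keys}
def build_children_py_alt (node_ids : List String) (parents : List (String × List String)) : List (String × List String) :=
  let keys := PySem.Set.ofList node_ids
  keys.map (fun k =>
    (k, PySem.List.sorted
          (node_ids.flatMap (fun nid =>
            (((List.lookup nid parents).getD []).filter (fun q => q == k)).map (fun _ => nid)))
          (fun x => x) false))

-- ===== PRECONDITION & SPEC =====
def Spec_build_children_py (node_ids : List String) (parents : List (String × List String)) (out : List (String × List String)) : Prop := out = build_children_py_alt node_ids parents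
instance (node_ids : List String) (parents : List (String × List String)) (out : List (String × List String)) : Decidable (Spec_build_children_py node_ids parents out) := by unfold Spec_build_children_py; infer_instance

-- ===== CLAIM (what is proved, stated in full; the proofs are below) =====
def Claim_equal_build_children_py : Prop := ∀ (node_ids : List String) (parents : List (String × List String)), Dom_build_children_py node_ids parents → Spec_build_children_py node_ids parents (build_children_py node_ids parents)

-- ===== LEMMAS AND PROOFS =====

-- per-key contribution of A's population loop: one copy of nid per occurrence of k in parents.get(nid, [])
def contrib (parents : List (String × List String)) (l : List String) (k : String) : List String :=
  l.flatMap (fun nid => List.replicate (((List.lookup nid parents).getD []).count k) nid)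

-- B's per-key gather is the same contribution list
theorem contribB_eq (parents : List (String × List String)) (l : List String) (k : String) :
    l.flatMap (fun nid =>
      (((List.lookup nid parents).getD []).filter (fun q => q == k)).map (fun _ => nid))
      = contrib parents l k := by
  induction l with
  | nil => rfl
  | cons nid rest ih =>
    simp only [contrib, List.flatMap_cons] at *
    rw [ih]
    congr 1
    rw [List.map_const']
    congr 1
    rw [List.count, List.countP_eq_length_filter]

-- the inner loop (over one parent list) keeps the key set
theorem inner_keys (plist : List String) (nid : String) (d : PySem.Dict String (List String)) :
    (plist.foldl (fun d p => if d.contains p then d.modify p [] (fun v => v ++ [nid]) else d) d).keys = d.keys := by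
  induction plist generalizing d with
  | nil => rfl
  | cons p rest ih =>
    simp only [List.foldl_cons]
    by_cases h : d.contains p = true
    · rw [if_pos h, ih, PySem.Dict.keys_modify,
          PySem.Dict.keys_insert_of_contains _ _ h]
    · rw [if_neg h, ih]

-- the inner loop appends one nid per occurrence of k in plist, at every present key k
theorem inner_getD (plist : List String) (nid : String) (d : PySem.Dict String (List String))
    (k : String) (hk : d.contains k = true) :
    (plist.foldl (fun d p => if d.contains p then d.modify p [] (fun v => v ++ [nid]) else d) d).getD k []
      = d.getD k [] ++ List.replicate (plist.count k) nid := by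
  induction plist generalizing d with
  | nil => simp only [List.foldl_nil, List.count_nil, List.replicate_zero, List.append_nil]
  | cons p rest ih =>
    simp only [List.foldl_cons]
    by_cases h : d.contains p = true
    · rw [if_pos h]
      have hk' : (d.modify p [] (fun v => v ++ [nid])).contains k = true := by
        rw [PySem.Dict.contains_modify]; simp [hk]
      rw [ih _ hk', PySem.Dict.getD_modify]
      by_cases hkp : k = p
      · subst hkp
        simp [List.replicate_succ, List.append_assoc]
      · have : (p::rest).count k = rest.count k := by
          simp [Ne.symm hkp]
        simp [hkp, this]
    · rw [if_neg h]
      have hkp : k ≠ p := fun he => h (he ▸ hk)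
      have : (p::rest).count k = rest.count k := by
        simp [Ne.symm hkp]
      rw [ih _ hk, this]

-- the population loop keeps the key set
theorem pop_keys (parents : List (String × List String)) (l : List String) (d : PySem.Dict String (List String)) :
    (l.foldl (fun d nid =>
      ((List.lookup nid parents).getD []).foldl
        (fun d p => if d.contains p then d.modify p [] (fun v => v ++ [nid]) else d) d) d).keys = d.keys := by
  induction l generalizing d with
  | nil => rfl
  | cons nid rest ih => simp only [List.foldl_cons]; rw [ih, inner_keys]

-- the population loop appends contrib, at every present key
theorem pop_getD (parents : List (String × List String)) (l : List String) (d : PySem.Dict String (List String))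
    (k : String) (hk : d.contains k = true) :
    (l.foldl (fun d nid =>
      ((List.lookup nid parents).getD []).foldl
        (fun d p => if d.contains p then d.modify p [] (fun v => v ++ [nid]) else d) d) d).getD k []
      = d.getD k [] ++ contrib parents l k := by
  induction l generalizing d with
  | nil => simp [contrib]
  | cons nid rest ih =>
    simp only [List.foldl_cons]
    have hk' : (((List.lookup nid parents).getD []).foldl
        (fun d p => if d.contains p then d.modify p [] (fun v => v ++ [nid]) else d) d).contains k = true := by
      rw [PySem.Dict.contains_iff_mem_keys, inner_keys, ← PySem.Dict.contains_iff_mem_keys]; exact hk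
    rw [ih _ hk', inner_getD _ _ _ _ hk]
    simp [contrib, List.flatMap_cons, List.append_assoc]

-- the initial dict has value [] at every key
theorem init_getD (node_ids : List String) (k : String) :
    (node_ids.foldl (fun d nid => d.insert nid ([] : List String)) PySem.Dict.empty).getD k [] = [] := by
  have h : ∀ (d : PySem.Dict String (List String)), d.getD k [] = [] →
      (node_ids.foldl (fun d nid => d.insert nid ([] : List String)) d).getD k [] = [] := by
    induction node_ids with
    | nil => intro d hd; simpa using hd
    | cons a rest ih =>
      intro d hd
      simp only [List.foldl_cons]
      apply ih
      rw [PySem.Dict.getD_insert]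
      split <;> simp [hd]
  exact h _ (by simp)

-- the initial dict's keys are the distinct node ids in order
theorem init_keys (node_ids : List String) :
    (node_ids.foldl (fun d nid => d.insert nid ([] : List String)) PySem.Dict.empty).keys
      = PySem.Set.ofList node_ids := by
  rw [PySem.Dict.keys_foldl_insert]
  simp [PySem.Set.update, PySem.Set.ofList_eq_foldl, PySem.Dict.keys_empty]

-- a fold of inserts over keys not containing a leaves getD a unchanged
theorem getD_foldl_insert_of_not_mem (l : List String) (g : PySem.Dict String (List String) → String → List String)
    (d : PySem.Dict String (List String)) (a : String) (ha : a ∉ l) :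
    (l.foldl (fun d nid => d.insert nid (g d nid)) d).getD a [] = d.getD a [] := by
  induction l generalizing d with
  | nil => rfl
  | cons x rest ih =>
    simp only [List.foldl_cons]
    have hax : a ≠ x := fun h => ha (h ▸ List.mem_cons_self)
    rw [ih _ (fun h => ha (List.mem_cons_of_mem _ h)), PySem.Dict.getD_insert, if_neg hax]

-- the final per-bucket pass rewrites each present key's value through f, reading the pre-pass value
theorem final_getD (K : List String) (f : List String → List String)
    (d : PySem.Dict String (List String)) (hK : K.Nodup) (k : String) (hk : k ∈ K) :
    (K.foldl (fun d nid => d.insert nid (f (d.getD nid []))) d).getD k [] = f (d.getD k []) := by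
  induction K generalizing d with
  | nil => cases hk
  | cons a rest ih =>
    simp only [List.foldl_cons]
    have hna : a ∉ rest := (List.nodup_cons.mp hK).1
    rcases List.mem_cons.mp hk with h | h
    · subst h
      rw [getD_foldl_insert_of_not_mem _ _ _ _ hna, PySem.Dict.getD_insert_self]
    · have hka : k ≠ a := fun he => hna (he ▸ h)
      rw [ih _ (List.nodup_cons.mp hK).2 h, PySem.Dict.getD_insert, if_neg hka]

-- Set.update by elements already present is the identity
theorem set_update_self (s : List String) (l : List String) (h : ∀ x ∈ l, x ∈ s) :
    PySem.Set.update s l = s := by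
  induction l generalizing s with
  | nil => rfl
  | cons x rest ih =>
    simp only [PySem.Set.update, List.foldl_cons] at *
    rw [PySem.Set.add_of_mem (h x List.mem_cons_self)]
    exact ih s (fun y hy => h y (List.mem_cons_of_mem _ hy))

-- a dict with distinct keys is its keys paired with their values
theorem items_eq_keys_map (d : PySem.Dict String (List String)) (h : d.keys.Nodup) :
    d.items = d.keys.map (fun k => (k, d.getD k [])) := by
  have : d.keys.map (fun k => (k, d.getD k [])) = d.items.map (fun p => (p.1, d.getD p.1 [])) := by
    simp [PySem.Dict.keys, List.map_map, Function.comp_def]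
  rw [this, List.map_congr_left (fun p hp => ?_), List.map_id']
  have := PySem.Dict.getD_of_mem_items (d := d) (k := p.1) (v := p.2) (by simpa using hp) h (d0 := [])
  simp [this]

-- ===== VERDICT (by name: the statement is the Claim_ definition above) =====
theorem build_children_py_spec : Claim_equal_build_children_py := by
  intro node_ids parents _
  unfold Spec_build_children_py build_children_py build_children_py_alt
  set d0 := node_ids.foldl (fun d nid => d.insert nid ([] : List String)) PySem.Dict.empty with hd0
  have hkeys0 : d0.keys = PySem.Set.ofList node_ids := init_keys node_ids
  have hnodup0 : d0.keys.Nodup := hkeys0 ▸ PySem.Set.nodup_ofList node_ids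
  set dA := node_ids.foldl (fun d nid =>
      ((List.lookup nid parents).getD []).foldl
        (fun d p => if d.contains p then d.modify p [] (fun v => v ++ [nid]) else d) d) d0 with hdA
  have hkA : dA.keys = d0.keys := pop_keys parents node_ids d0
  set dA2 := (dA.keys).foldl
      (fun d nid => d.insert nid (PySem.List.sorted (d.getD nid []) (fun x => x) false)) dA with hdA2
  have hkA2 : dA2.keys = dA.keys := by
    rw [hdA2, PySem.Dict.keys_foldl_insert]
    exact set_update_self _ _ (fun x hx => hx)
  rw [items_eq_keys_map dA2 (hkA2 ▸ hkA ▸ hnodup0), hkA2, hkA, hkeys0]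
  apply List.map_congr_left
  intro k hk
  have hk' : k ∈ d0.keys := hkeys0 ▸ hk
  have hck : d0.contains k = true := by rw [PySem.Dict.contains_iff_mem_keys]; exact hk'
  have hvA : dA.getD k [] = contrib parents node_ids k := by
    rw [hdA, pop_getD parents node_ids d0 k hck, hd0, init_getD]; simp
  have hfin : dA2.getD k [] = PySem.List.sorted (dA.getD k []) (fun x => x) false := by
    rw [hdA2]
    exact final_getD _ _ dA (hkA ▸ hnodup0) k (hkA.symm ▸ hk')
  rw [hfin, hvA, contribB_eq]
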